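-- pv_equiv track=rewrite | github.com/sungyeong98/programmers | 프로그래머스/4/12984. 지형 편집/지형 편집.py | solution
-- ===== SOURCE A (Python) =====
-- from itertools import chain
--
-- def solution(land, p, q):
--     line=list(chain.from_iterable(land))
--     line.sort()
--     n=len(line)
--     cost=(sum(line)-line[0]*n)*q
--     answer=cost
--     for i in range(1,n):
--         if line[i]!=line[i-1]:
--             cost=cost+((line[i]-line[i-1])*i*p)-((line[i]-line[i-1])*(n-i)*q)
--             if answer<cost:
--                 break
--             answer=min(answer,cost)
--     return answer
-- ===== SOURCE B (Python) =====
-- def _level_index(n, p, q):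
--     s = p + q
--     if s > 0:
--         i = n * q // s
--         if i < 0:
--             i = 0
--         if i > n - 1:
--             i = n - 1
--         return i
--     return n - 1 if n * p <= 0 else 0
--
-- def solution(land, p, q):
--     line = sorted(h for row in land for h in row)
--     n = len(line)
--     i = _level_index(n, p, q)
--     h = line[i]
--     low = sum(line[:i])
--     total = low + sum(line[i:])
--     return p * (h * i - low) + q * ((total - low) - h * (n - i))
-- ===== Notes on version B (the rewrite author's own statement) =====
-- stated objective: alternative
-- what changed: B does not scan candidate heights at all: it computes the optimal level's position directly as the weighted quantile index n*q//(p+q) (clamped; constant-slope case p+q==0 handled by sign), then evaluates the leveling cost once in closed form from the element at that index and the sum of the elements below it, replacing A's incremental cost scan over distinct heights with early break.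
-- outside the precondition, e.g. on solution([[-1, 0, 1, 3]], -9, -9): A returns -63, B returns -81
import Mathlib
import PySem

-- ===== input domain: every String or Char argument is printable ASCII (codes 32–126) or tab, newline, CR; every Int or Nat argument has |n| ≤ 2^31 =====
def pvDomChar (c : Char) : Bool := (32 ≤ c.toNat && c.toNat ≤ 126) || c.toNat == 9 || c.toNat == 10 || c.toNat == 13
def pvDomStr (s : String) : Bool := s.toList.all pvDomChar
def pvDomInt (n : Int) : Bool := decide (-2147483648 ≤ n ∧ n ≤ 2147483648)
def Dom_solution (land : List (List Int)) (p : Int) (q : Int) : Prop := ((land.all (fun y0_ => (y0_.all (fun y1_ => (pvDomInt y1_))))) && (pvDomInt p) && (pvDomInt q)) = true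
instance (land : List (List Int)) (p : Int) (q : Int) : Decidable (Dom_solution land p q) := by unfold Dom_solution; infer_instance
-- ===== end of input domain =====

-- B replaces A's candidate scan entirely: it computes the optimal level's position in closed form
-- as the weighted quantile index n*q // (p+q) (clamped; constant-slope case p+q = 0 by sign) and
-- evaluates the cost once there (alternative algorithm; correct because the cost is convex in the
-- sorted position when 0 ≤ p+q, which Pre_ requires).

-- ===== PORT A =====
-- A's for-loop over range(1, n) with break, cost and answer as accumulators
def solutionLoopA (line : List Int) (n p q : Int) : List Int → Int → Int → Int
  | [], _, answer => answer
  | i :: rest, cost, answer =>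
    if PySem.List.pyGetD line i 0 ≠ PySem.List.pyGetD line (i - 1) 0 then
      let cost' := cost + ((PySem.List.pyGetD line i 0 - PySem.List.pyGetD line (i - 1) 0) * i * p)
        - ((PySem.List.pyGetD line i 0 - PySem.List.pyGetD line (i - 1) 0) * (n - i) * q)
      if answer < cost' then answer
      else solutionLoopA line n p q rest cost' (min answer cost')
    else solutionLoopA line n p q rest cost answer

def solution (land : List (List Int)) (p : Int) (q : Int) : Int :=
  let line := PySem.List.sorted land.flatten (fun x => x) false
  let n : Int := (line.length : Int)
  -- line[0] raises IndexError on an empty grid (excluded by Pre_); indices in the loop are in range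
  let cost := (line.sum - PySem.List.pyGetD line 0 0 * n) * q
  solutionLoopA line n p q (PySem.List.pyRange 1 n 1) cost cost

-- ===== PORT B =====
-- B's helper _level_index: the clamped weighted-quantile position of the optimal level
def levelIndex (n p q : Int) : Int :=
  let s := p + q
  if s > 0 then
    let i0 := PySem.Int.floordiv (n * q) s
    let i1 := if i0 < 0 then 0 else i0
    if i1 > n - 1 then n - 1 else i1
  else if n * p ≤ 0 then n - 1 else 0

def solution_alt (land : List (List Int)) (p : Int) (q : Int) : Int :=
  let line := PySem.List.sorted land.flatten (fun x => x) false
  let n : Int := (line.length : Int)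
  let i := levelIndex n p q
  -- line[i] raises IndexError on an empty grid (excluded by Pre_)
  let h := PySem.List.pyGetD line i 0
  let low := (PySem.List.slice line none (some i)).sum
  let total := low + (PySem.List.slice line (some i) none).sum
  p * (h * i - low) + q * ((total - low) - h * (n - i))

-- ===== PRECONDITION & SPEC =====
-- Pre_ excludes empty grids, on which both A and B raise IndexError, and inputs with p + q < 0 —
-- outside the natural domain of nonnegative unit costs — where the cost over sorted positions is
-- not convex, A's early break can stop at a local minimum and B's quantile formula does not apply.
def Pre_solution (land : List (List Int)) (p : Int) (q : Int) : Prop :=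
  land.flatten ≠ [] ∧ 0 ≤ p + q
instance (land : List (List Int)) (p : Int) (q : Int) : Decidable (Pre_solution land p q) := by
  unfold Pre_solution; infer_instance

def pvWitness_solution : List (List Int) × Int × Int := ([[1, 2], [3]], 2, 3)

def Spec_solution (land : List (List Int)) (p : Int) (q : Int) (out : Int) : Prop := out = solution_alt land p q
instance (land : List (List Int)) (p : Int) (q : Int) (out : Int) : Decidable (Spec_solution land p q out) := by unfold Spec_solution; infer_instance

-- ===== CLAIM (what is proved, stated in full; the proofs are below) =====
def Claim_equal_solution : Prop := ∀ (land : List (List Int)) (p : Int) (q : Int), Dom_solution land p q → Pre_solution land p q → Spec_solution land p q (solution land p q)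

-- ===== LEMMAS AND PROOFS =====

-- sum of the first i heights of the sorted list
def Pfx (l : List Int) (i : Nat) : Int := (l.take i).sum

-- the exact leveling cost of candidate height l[i]
def Cst (l : List Int) (p q : Int) (i : Nat) : Int :=
  p * (l.getD i 0 * (i : Int) - Pfx l i)
    + q * ((l.sum - Pfx l i) - l.getD i 0 * ((l.length : Int) - (i : Int)))

-- running minimum of Cst over 0..i
def minC (l : List Int) (p q : Int) : Nat → Int
  | 0 => Cst l p q 0
  | i + 1 => min (minC l p q i) (Cst l p q (i + 1))

-- slope factor of the cost increment at index i
def sVal (l : List Int) (p q : Int) (i : Nat) : Int :=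
  (i : Int) * p - ((l.length : Int) - (i : Int)) * q

lemma Pfx_succ (l : List Int) (i : Nat) (h : i < l.length) :
    Pfx l (i + 1) = Pfx l i + l.getD i 0 := by
  unfold Pfx
  rw [List.take_add_one, List.sum_append, List.getD_eq_getElem _ _ h,
    List.getElem?_eq_getElem h]
  simp

lemma Cst_succ (l : List Int) (p q : Int) (i : Nat) (h : i + 1 < l.length) :
    Cst l p q (i + 1)
      = Cst l p q i + (l.getD (i + 1) 0 - l.getD i 0) * sVal l p q (i + 1) := by
  have h1 : i < l.length := by omega
  simp only [Cst, sVal, Pfx_succ l i h1]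
  push_cast
  ring

lemma sVal_mono (l : List Int) (p q : Int) (hpq : 0 ≤ p + q) {i j : Nat} (hij : i ≤ j) :
    sVal l p q i ≤ sVal l p q j := by
  have hij' : (i : Int) ≤ (j : Int) := by exact_mod_cast hij
  have h0 : 0 ≤ ((j : Int) - (i : Int)) * (p + q) :=
    mul_nonneg (by omega) hpq
  simp only [sVal]
  nlinarith

lemma getD_mono (l : List Int) (hs : l.Pairwise (· ≤ ·)) {i j : Nat}
    (hij : i ≤ j) (hj : j < l.length) : l.getD i 0 ≤ l.getD j 0 := by
  have hi : i < l.length := lt_of_le_of_lt (Nat.lt_succ_iff.mp (Nat.lt_succ_of_le hij)) hj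
  rw [List.getD_eq_getElem _ _ hi, List.getD_eq_getElem _ _ hj]
  rcases Nat.lt_or_ge i j with hlt | hge
  · exact (List.pairwise_iff_getElem.mp hs) i j hi hj hlt
  · have : i = j := le_antisymm hij hge
    subst this; exact le_refl _

-- cost is nonincreasing up to any index whose slope factor is still nonpositive
lemma Cst_le_of_s_nonpos (l : List Int) (p q : Int) (hpq : 0 ≤ p + q)
    (hs : l.Pairwise (· ≤ ·)) (j : Nat) :
    ∀ i, j ≤ i → i < l.length → sVal l p q i ≤ 0 → Cst l p q i ≤ Cst l p q j := by
  intro i hji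
  induction i, hji using Nat.le_induction with
  | base => intro _ _; exact le_refl _
  | succ i hji ih =>
    intro hlen hsv
    have hil : i < l.length := by omega
    have hd : 0 ≤ l.getD (i + 1) 0 - l.getD i 0 :=
      sub_nonneg.mpr (getD_mono l hs (Nat.le_succ i) hlen)
    have hsv' : sVal l p q i ≤ 0 :=
      le_trans (sVal_mono l p q hpq (Nat.le_succ i)) hsv
    have hc := Cst_succ l p q i hlen
    have hprod : (l.getD (i + 1) 0 - l.getD i 0) * sVal l p q (i + 1) ≤ 0 :=
      mul_nonpos_of_nonneg_of_nonpos hd hsv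
    have := ih hil hsv'
    omega

-- cost is nondecreasing from any index whose slope factor is already positive
lemma Cst_le_of_s_pos (l : List Int) (p q : Int) (hpq : 0 ≤ p + q)
    (hs : l.Pairwise (· ≤ ·)) (i : Nat) (hsv : 0 < sVal l p q i) :
    ∀ m, i ≤ m → m < l.length → Cst l p q i ≤ Cst l p q m := by
  intro m him
  induction m, him using Nat.le_induction with
  | base => intro _; exact le_refl _
  | succ m him ih =>
    intro hlen
    have hml : m < l.length := by omega
    have hd : 0 ≤ l.getD (m + 1) 0 - l.getD m 0 :=
      sub_nonneg.mpr (getD_mono l hs (Nat.le_succ m) hlen)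
    have hsv' : 0 < sVal l p q (m + 1) :=
      lt_of_lt_of_le hsv (sVal_mono l p q hpq (by omega))
    have hc := Cst_succ l p q m hlen
    have hprod : 0 ≤ (l.getD (m + 1) 0 - l.getD m 0) * sVal l p q (m + 1) :=
      mul_nonneg hd (le_of_lt hsv')
    have := ih hml
    omega

-- cost grows forward from i as soon as the NEXT slope factor is positive
lemma Cst_le_forward (l : List Int) (p q : Int) (hpq : 0 ≤ p + q)
    (hs : l.Pairwise (· ≤ ·)) (i : Nat) (hsv : 0 < sVal l p q (i + 1)) :
    ∀ m, i ≤ m → m < l.length → Cst l p q i ≤ Cst l p q m := by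
  intro m him hml
  rcases Nat.eq_or_lt_of_le him with heq | hlt
  · subst heq; exact le_refl _
  · have hlen : i + 1 < l.length := by omega
    have hd : 0 ≤ l.getD (i + 1) 0 - l.getD i 0 :=
      sub_nonneg.mpr (getD_mono l hs (Nat.le_succ i) hlen)
    have hstep : Cst l p q i ≤ Cst l p q (i + 1) := by
      have hc := Cst_succ l p q i hlen
      have hprod : 0 ≤ (l.getD (i + 1) 0 - l.getD i 0) * sVal l p q (i + 1) :=
        mul_nonneg hd (le_of_lt hsv)
      omega
    exact le_trans hstep (Cst_le_of_s_pos l p q hpq hs (i + 1) hsv m (by omega) hml)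

lemma minC_le (l : List Int) (p q : Int) : ∀ i j, j ≤ i → minC l p q i ≤ Cst l p q j := by
  intro i
  induction i with
  | zero => intro j hj; interval_cases j; exact le_refl _
  | succ i ih =>
    intro j hj
    rcases Nat.lt_or_ge j (i + 1) with hlt | hge
    · exact le_trans (min_le_left _ _) (ih j (by omega))
    · have : j = i + 1 := by omega
      subst this; exact min_le_right _ _

lemma minC_attained (l : List Int) (p q : Int) :
    ∀ i, ∃ j, j ≤ i ∧ minC l p q i = Cst l p q j := by
  intro i
  induction i with
  | zero => exact ⟨0, le_refl _, rfl⟩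
  | succ i ih =>
    obtain ⟨j, hj, hmin⟩ := ih
    rcases le_total (minC l p q i) (Cst l p q (i + 1)) with h | h
    · refine ⟨j, by omega, ?_⟩
      show min (minC l p q i) (Cst l p q (i + 1)) = Cst l p q j
      rw [min_eq_left h, hmin]
    · refine ⟨i + 1, le_refl _, ?_⟩
      show min (minC l p q i) (Cst l p q (i + 1)) = Cst l p q (i + 1)
      rw [min_eq_right h]

lemma minC_frozen (l : List Int) (p q : Int) (i : Nat) :
    ∀ k, (∀ m, i < m → m ≤ i + k → minC l p q i ≤ Cst l p q m) →
      minC l p q (i + k) = minC l p q i := by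
  intro k
  induction k with
  | zero => intro _; rfl
  | succ k ih =>
    intro h
    have h1 : minC l p q (i + k) = minC l p q i := ih (fun m hm hk => h m hm (by omega))
    have h2 : minC l p q i ≤ Cst l p q (i + k + 1) := h (i + k + 1) (by omega) (by omega)
    show min (minC l p q (i + k)) (Cst l p q (i + k + 1)) = minC l p q i
    rw [h1, min_eq_left h2]

lemma minC_pred (l : List Int) (p q : Int) (i : Nat) (h : 1 ≤ i) :
    minC l p q i = min (minC l p q (i - 1)) (Cst l p q i) := by
  cases i with
  | zero => omega
  | succ j => simp [minC]

-- A's loop, entered at index i with cost = Cst (i-1) and answer = minC (i-1), computes minC (n-1)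
lemma loopA_eq (l : List Int) (p q : Int) (hpq : 0 ≤ p + q) (hs : l.Pairwise (· ≤ ·)) :
    ∀ (k i : Nat), 1 ≤ i → l.length = i + k →
      solutionLoopA l (l.length : Int) p q (PySem.List.pyRange (i : Int) (l.length : Int) 1)
        (Cst l p q (i - 1)) (minC l p q (i - 1)) = minC l p q (l.length - 1) := by
  intro k
  induction k with
  | zero =>
    intro i h1 hlen
    rw [PySem.List.pyRange_one_eq_nil
      (by exact_mod_cast (show l.length ≤ i by omega))]
    have : i - 1 = l.length - 1 := by omega
    rw [solutionLoopA, this]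
  | succ k ih =>
    intro i h1 hlen
    have hil : i < l.length := by omega
    rw [PySem.List.pyRange_one_cons (by exact_mod_cast hil), solutionLoopA]
    have e1 : (i : Int) - 1 = ((i - 1 : Nat) : Int) := by omega
    have e2 : (i : Int) + 1 = ((i + 1 : Nat) : Int) := by omega
    have ei : i - 1 + 1 = i := by omega
    have hstep := Cst_succ l p q (i - 1) (by omega)
    rw [ei] at hstep
    simp only [e1, PySem.List.pyGetD_natCast]
    by_cases hne : l.getD i 0 = l.getD (i - 1) 0
    · -- equal heights: cost and answer unchanged, Cst and minC also unchanged
      simp only [hne, ne_eq, not_true_eq_false, if_false]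
      have hCeq : Cst l p q i = Cst l p q (i - 1) := by
        rw [hstep, hne]; ring
      have hMeq : minC l p q i = minC l p q (i - 1) := by
        rw [minC_pred l p q i h1, hCeq]
        exact min_eq_left (minC_le l p q (i - 1) (i - 1) (le_refl _))
      have := ih (i + 1) (by omega) (by omega)
      rw [Nat.add_sub_cancel] at this
      rw [← e2, hCeq, hMeq] at this
      exact this
    · simp only [hne, ne_eq, not_false_eq_true, if_true]
      have hcost' : Cst l p q (i - 1)
            + (l.getD i 0 - l.getD (i - 1) 0) * (i : Int) * p
            - (l.getD i 0 - l.getD (i - 1) 0) * ((l.length : Int) - (i : Int)) * q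
          = Cst l p q i := by
        rw [hstep]; simp only [sVal]; ring
      rw [hcost']
      by_cases hbr : minC l p q (i - 1) < Cst l p q i
      · -- break: the remaining costs never drop below the current answer
        simp only [hbr, if_true]
        have hspos : 0 < sVal l p q i := by
          by_contra hnp
          rw [not_lt] at hnp
          obtain ⟨j, hj, hmin⟩ := minC_attained l p q (i - 1)
          have := Cst_le_of_s_nonpos l p q hpq hs j i (by omega) hil hnp
          omega
        have hfr : ∀ m, i - 1 < m → m ≤ (i - 1) + (l.length - i) → minC l p q (i - 1) ≤ Cst l p q m := by
          intro m hm1 hm2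
          have him : i ≤ m := by omega
          have hml : m < l.length := by omega
          exact le_of_lt (lt_of_lt_of_le hbr (Cst_le_of_s_pos l p q hpq hs i hspos m him hml))
        have := minC_frozen l p q (i - 1) (l.length - i) hfr
        have e3 : i - 1 + (l.length - i) = l.length - 1 := by omega
        rw [e3] at this
        exact this.symm
      · simp only [hbr, if_false]
        have hMi : min (minC l p q (i - 1)) (Cst l p q i) = minC l p q i :=
          (minC_pred l p q i h1).symm
        have := ih (i + 1) (by omega) (by omega)
        rw [Nat.add_sub_cancel, ← e2] at this
        rw [hMi]
        exact this

lemma sorted_flat_ne (land : List (List Int)) (h : land.flatten ≠ []) :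
    PySem.List.sorted land.flatten (fun x => x) false ≠ [] := by
  intro hc
  exact h ((PySem.List.sorted_eq_nil_iff _ _ _).mp hc)

lemma solution_eq (land : List (List Int)) (p q : Int)
    (hne : land.flatten ≠ []) (hpq : 0 ≤ p + q) :
    solution land p q
      = minC (PySem.List.sorted land.flatten (fun x => x) false) p q
          ((PySem.List.sorted land.flatten (fun x => x) false).length - 1) := by
  set l := PySem.List.sorted land.flatten (fun x => x) false with hl
  have hs : l.Pairwise (· ≤ ·) := by
    have := PySem.List.sorted_pairwise (xs := land.flatten) (key := fun x => x)
    simpa using this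
  have hlen : 1 ≤ l.length := by
    have h' := sorted_flat_ne land hne
    rw [← hl] at h'
    exact List.length_pos_of_ne_nil h'
  show solutionLoopA l (l.length : Int) p q (PySem.List.pyRange 1 (l.length : Int) 1)
      ((l.sum - PySem.List.pyGetD l 0 0 * (l.length : Int)) * q)
      ((l.sum - PySem.List.pyGetD l 0 0 * (l.length : Int)) * q)
      = minC l p q (l.length - 1)
  have hC0 : (l.sum - PySem.List.pyGetD l 0 0 * (l.length : Int)) * q = Cst l p q 0 := by
    rw [PySem.List.pyGetD_zero]
    simp only [Cst, Pfx, List.take_zero, List.sum_nil, Nat.cast_zero]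
    ring
  have h0 : minC l p q 0 = Cst l p q 0 := rfl
  have := loopA_eq l p q hpq hs (l.length - 1) 1 (le_refl _) (by omega)
  simp only [Nat.sub_self] at this
  rw [hC0, ← h0]
  have e : ((1 : Nat) : Int) = 1 := by norm_num
  rw [← e]
  exact this

-- levelIndex stays within [0, n-1] for a nonempty list and 0 ≤ p+q
lemma levelIndex_bounds (n p q : Int) (hn : 1 ≤ n) (_hpq : 0 ≤ p + q) :
    0 ≤ levelIndex n p q ∧ levelIndex n p q ≤ n - 1 := by
  simp only [levelIndex]
  split_ifs <;> omega

-- the slope factor at j is nonpositive iff j is at most the quantile index (p+q > 0)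
lemma sVal_le_iff (l : List Int) (p q : Int) (hs : 0 < p + q) (j : Nat) :
    sVal l p q j ≤ 0 ↔ (j : Int) ≤ PySem.Int.floordiv ((l.length : Int) * q) (p + q) := by
  rw [PySem.Int.le_floordiv_iff_mul_le hs]
  simp only [sVal]
  constructor <;> intro h <;> nlinarith

-- the quantile index minimises Cst over all positions
lemma Cst_levelIndex_min (l : List Int) (p q : Int) (hpq : 0 ≤ p + q)
    (hs : l.Pairwise (· ≤ ·)) (h1 : 1 ≤ l.length) :
    ∀ j, j < l.length → Cst l p q (levelIndex (l.length : Int) p q).toNat ≤ Cst l p q j := by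
  have hn : (1 : Int) ≤ (l.length : Int) := by exact_mod_cast h1
  obtain ⟨hi0, hi1⟩ := levelIndex_bounds (l.length : Int) p q hn hpq
  set i : Int := levelIndex (l.length : Int) p q with hidef
  set iN : Nat := i.toNat with hiN
  have hcast : (iN : Int) = i := Int.toNat_of_nonneg hi0
  have hiNlt : iN < l.length := by omega
  intro j hj
  by_cases hsgn : 0 < p + q
  · set i0 : Int := PySem.Int.floordiv ((l.length : Int) * q) (p + q) with hi0def
    have hval : i = if (if i0 < 0 then 0 else i0) > (l.length : Int) - 1
        then (l.length : Int) - 1 else (if i0 < 0 then 0 else i0) := by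
      rw [hidef]; unfold levelIndex
      rw [if_pos hsgn]
    have hA : i = 0 ∨ i ≤ i0 := by
      by_cases hc : i0 < 0
      · left; rw [hval, if_pos hc]; omega
      · right; rw [hval, if_neg hc]; split_ifs <;> omega
    have hB : i = (l.length : Int) - 1 ∨ i0 ≤ i := by
      by_cases hc : i0 < 0
      · rcases le_total ((l.length : Int) - 1) 0 with h | h
        · left; rw [hval, if_pos hc]; split_ifs <;> omega
        · right; rw [hval, if_pos hc]; split_ifs <;> omega
      · rw [hval, if_neg hc]; split_ifs <;> omega
    rcases Nat.lt_or_ge iN j with hlt | hle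
    · -- j above the quantile: cost nondecreasing from iN on
      rcases hB with hend | hge0
      · exfalso
        have : iN = l.length - 1 := by omega
        omega
      · have hsv : 0 < sVal l p q (iN + 1) := by
          by_contra hc
          rw [not_lt] at hc
          have := (sVal_le_iff l p q hsgn (iN + 1)).mp hc
          rw [← hi0def] at this
          push_cast at this
          omega
        exact Cst_le_forward l p q hpq hs iN hsv j (by omega) hj
    · -- j at or below the quantile: cost nonincreasing up to iN
      rcases hA with h0 | hle0
      · have hiN0 : iN = 0 := by omega
        have hj0 : j = 0 := by omega
        rw [hiN0, hj0]
      · have hsv : sVal l p q iN ≤ 0 := by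
          rw [sVal_le_iff l p q hsgn iN, hcast, ← hi0def]
          exact hle0
        exact Cst_le_of_s_nonpos l p q hpq hs j iN hle hiNlt hsv
  · -- p + q = 0: the slope factor is the constant n*p
    have hz : p + q = 0 := by omega
    have hq : q = -p := by omega
    have hconst : ∀ m : Nat, sVal l p q m = (l.length : Int) * p := by
      intro m; simp only [sVal, hq]; ring
    have hval : i = if (l.length : Int) * p ≤ 0 then (l.length : Int) - 1 else 0 := by
      rw [hidef]; unfold levelIndex
      rw [if_neg (by omega)]
    by_cases hnp : (l.length : Int) * p ≤ 0
    · have hiv : i = (l.length : Int) - 1 := by rw [hval, if_pos hnp]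
      have hiNv : iN = l.length - 1 := by omega
      have hsv : sVal l p q iN ≤ 0 := by rw [hconst]; exact hnp
      exact Cst_le_of_s_nonpos l p q hpq hs j iN (by omega) hiNlt hsv
    · have hiv : i = 0 := by rw [hval, if_neg hnp]
      have hiNv : iN = 0 := by omega
      have hsv : 0 < sVal l p q iN := by rw [hconst]; omega
      exact Cst_le_of_s_pos l p q hpq hs iN hsv j (by omega) hj

-- B computes exactly Cst at the quantile index
lemma solution_alt_eq_Cst (land : List (List Int)) (p q : Int)
    (hne : land.flatten ≠ []) (hpq : 0 ≤ p + q) :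
    solution_alt land p q
      = Cst (PySem.List.sorted land.flatten (fun x => x) false) p q
          (levelIndex ((PySem.List.sorted land.flatten (fun x => x) false).length : Int) p q).toNat := by
  set l := PySem.List.sorted land.flatten (fun x => x) false with hl
  have hlen : 1 ≤ l.length := by
    have h' := sorted_flat_ne land hne
    rw [← hl] at h'
    exact List.length_pos_of_ne_nil h'
  have hn : (1 : Int) ≤ (l.length : Int) := by exact_mod_cast hlen
  obtain ⟨hi0, hi1⟩ := levelIndex_bounds (l.length : Int) p q hn hpq
  set i : Int := levelIndex (l.length : Int) p q with hidef
  set iN : Nat := i.toNat with hiN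
  have hcast : (iN : Int) = i := Int.toNat_of_nonneg hi0
  have hiNlt : iN < l.length := by omega
  show p * (PySem.List.pyGetD l i 0 * i - (PySem.List.slice l none (some i)).sum)
      + q * (((PySem.List.slice l none (some i)).sum + (PySem.List.slice l (some i) none).sum
            - (PySem.List.slice l none (some i)).sum)
          - PySem.List.pyGetD l i 0 * ((l.length : Int) - i))
      = Cst l p q iN
  rw [← hcast]
  rw [PySem.List.pyGetD_natCast, PySem.List.slice_to_natCast, PySem.List.slice_from_natCast]
  have hsum : (l.take iN).sum + (l.drop iN).sum = l.sum := by
    rw [← List.sum_append, List.take_append_drop]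
  simp only [Cst, Pfx]
  rw [← hsum]

-- ===== VERDICT (by name: the statement is the Claim_ definition above) =====
theorem solution_spec : Claim_equal_solution := by
  intro land p q _ hpre
  unfold Spec_solution
  obtain ⟨hne, hpq⟩ := hpre
  set l := PySem.List.sorted land.flatten (fun x => x) false with hl
  have hs : l.Pairwise (· ≤ ·) := by
    have := PySem.List.sorted_pairwise (xs := land.flatten) (key := fun x => x)
    simpa using this
  have hlen : 1 ≤ l.length := by
    have h' := sorted_flat_ne land hne
    rw [← hl] at h'
    exact List.length_pos_of_ne_nil h'
  rw [solution_eq land p q hne hpq, solution_alt_eq_Cst land p q hne hpq, ← hl]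
  have hmin := Cst_levelIndex_min l p q hpq hs hlen
  have hn : (1 : Int) ≤ (l.length : Int) := by exact_mod_cast hlen
  obtain ⟨hi0, hi1⟩ := levelIndex_bounds (l.length : Int) p q hn hpq
  have hle1 : minC l p q (l.length - 1) ≤ Cst l p q (levelIndex (l.length : Int) p q).toNat :=
    minC_le l p q (l.length - 1) (levelIndex ((l.length : Int)) p q).toNat (by omega)
  obtain ⟨j, hj, hatt⟩ := minC_attained l p q (l.length - 1)
  have hle2 := hmin j (by omega)
  omega
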